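-- pv_equiv track=rewrite | github.com/Principals-Network/potential-token-usage | src/core/conversation_coordinator.py | _extract_recurring_themes
-- ===== SOURCE A (Python) =====
-- from typing import Dict, List, Any
--
-- def _extract_recurring_themes(responses: List[str]) -> List[str]:
--     """Extract recurring themes from responses"""
--     # This would be better with NLP, but here's a simple version
--     common_themes = {
--         "technology": ["tech", "software", "digital", "data"],
--         "leadership": ["lead", "manage", "direct", "guide"],
--         "innovation": ["innovate", "create", "develop", "design"],
--         "growth": ["learn", "grow", "improve", "develop"]
--     }
--
--     found_themes = []
--     for theme, keywords in common_themes.items():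
--         if any(any(keyword in r.lower() for keyword in keywords) for r in responses):
--             found_themes.append(theme)
--
--     return found_themes
-- ===== SOURCE B (Python) =====
-- from typing import Dict, List, Any
--
-- # Inverted index keyword -> themes; each response is lowercased once and
-- # scanned in a single pass; output keeps the original theme order.
-- _THEME_ORDER = ["technology", "leadership", "innovation", "growth"]
--
-- _KEYWORD_INDEX = {
--     "tech": ["technology"], "software": ["technology"],
--     "digital": ["technology"], "data": ["technology"],
--     "lead": ["leadership"], "manage": ["leadership"],
--     "direct": ["leadership"], "guide": ["leadership"],
--     "innovate": ["innovation"], "create": ["innovation"],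
--     "develop": ["innovation", "growth"], "design": ["innovation"],
--     "learn": ["growth"], "grow": ["growth"], "improve": ["growth"],
-- }
--
-- def _extract_recurring_themes(responses: List[str]) -> List[str]:
--     seen = set()
--     for r in responses:
--         low = r.lower()
--         for kw, themes in _KEYWORD_INDEX.items():
--             if kw in low:
--                 seen.update(themes)
--     return [t for t in _THEME_ORDER if t in seen]
-- ===== Notes on version B (the rewrite author's own statement) =====
-- stated objective: faster
-- what changed: Replaces the per-theme nested any-scans (which lowercase each response once per theme) with an inverted keyword->themes index and a single pass that lowercases each response once, collecting matched themes in a set and emitting them in the fixed theme order.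
import Mathlib
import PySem

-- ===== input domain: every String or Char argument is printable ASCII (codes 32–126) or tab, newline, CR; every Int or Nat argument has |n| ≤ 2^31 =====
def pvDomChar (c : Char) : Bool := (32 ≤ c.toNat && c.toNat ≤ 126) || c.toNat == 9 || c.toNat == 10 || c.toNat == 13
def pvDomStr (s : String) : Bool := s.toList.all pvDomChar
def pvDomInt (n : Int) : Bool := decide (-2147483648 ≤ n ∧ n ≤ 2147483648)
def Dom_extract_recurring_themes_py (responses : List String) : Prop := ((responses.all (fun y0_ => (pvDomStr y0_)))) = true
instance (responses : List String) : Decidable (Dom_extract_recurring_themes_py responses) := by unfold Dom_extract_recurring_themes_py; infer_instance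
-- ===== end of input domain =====

-- B replaces A's per-theme nested scans by an inverted keyword→themes index,
-- lowercasing each response once in a single pass (objective: faster; measured).

-- ===== PORT A =====
def pvThemesA : List (String × List String) :=
  [("technology", ["tech", "software", "digital", "data"]),
   ("leadership", ["lead", "manage", "direct", "guide"]),
   ("innovation", ["innovate", "create", "develop", "design"]),
   ("growth", ["learn", "grow", "improve", "develop"])]

def extract_recurring_themes_py (responses : List String) : List String :=
  pvThemesA.foldl (fun found tk =>
    if responses.any (fun r => tk.2.any (fun kw => PySem.Str.isIn kw (PySem.Str.lower r)))
    then found ++ [tk.1] else found) []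

-- ===== PORT B =====
def pvIndexB : List (String × List String) :=
  [("tech", ["technology"]), ("software", ["technology"]),
   ("digital", ["technology"]), ("data", ["technology"]),
   ("lead", ["leadership"]), ("manage", ["leadership"]),
   ("direct", ["leadership"]), ("guide", ["leadership"]),
   ("innovate", ["innovation"]), ("create", ["innovation"]),
   ("develop", ["innovation", "growth"]), ("design", ["innovation"]),
   ("learn", ["growth"]), ("grow", ["growth"]), ("improve", ["growth"])]

def pvThemeOrder : List String := ["technology", "leadership", "innovation", "growth"]

def pvSeenB (responses : List String) : PySem.Set String :=
  responses.foldl (fun seen r =>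
    let low := PySem.Str.lower r
    pvIndexB.foldl (fun seen p =>
      if PySem.Str.isIn p.1 low then PySem.Set.update seen p.2 else seen) seen)
    PySem.Set.empty

def extract_recurring_themes_py_alt (responses : List String) : List String :=
  pvThemeOrder.filter (fun t => PySem.Set.contains (pvSeenB responses) t)

-- ===== PRECONDITION & SPEC =====
def Spec_extract_recurring_themes_py (responses : List String) (out : List String) : Prop := out = extract_recurring_themes_py_alt responses
instance (responses : List String) (out : List String) : Decidable (Spec_extract_recurring_themes_py responses out) := by unfold Spec_extract_recurring_themes_py; infer_instance

-- ===== CLAIM (what is proved, stated in full; the proofs are below) =====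
def Claim_equal_extract_recurring_themes_py : Prop := ∀ (responses : List String), Dom_extract_recurring_themes_py responses → Spec_extract_recurring_themes_py responses (extract_recurring_themes_py responses)

-- ===== LEMMAS AND PROOFS =====

theorem pv_mem_update (ys : List String) (s : PySem.Set String) (x : String) :
    x ∈ PySem.Set.update s ys ↔ x ∈ s ∨ x ∈ ys := by
  induction ys generalizing s with
  | nil => simp [PySem.Set.update]
  | cons y ys ih =>
    simp only [PySem.Set.update, List.foldl_cons] at *
    rw [ih]
    simp [PySem.Set.mem_add]
    tauto

theorem pv_mem_inner (idx : List (String × List String)) (low : String)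
    (s : PySem.Set String) (x : String) :
    x ∈ idx.foldl (fun seen p =>
        if PySem.Str.isIn p.1 low then PySem.Set.update seen p.2 else seen) s ↔
      x ∈ s ∨ ∃ p ∈ idx, PySem.Str.isIn p.1 low = true ∧ x ∈ p.2 := by
  induction idx generalizing s with
  | nil => simp
  | cons q idx ih =>
    simp only [List.foldl_cons]
    rw [ih]
    split_ifs with h
    · simp [pv_mem_update, h]
      tauto
    · simp
      tauto

theorem pv_mem_seen_aux (responses : List String) (s : PySem.Set String) (x : String) :
    x ∈ responses.foldl (fun seen r =>
        let low := PySem.Str.lower r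
        pvIndexB.foldl (fun seen p =>
          if PySem.Str.isIn p.1 low then PySem.Set.update seen p.2 else seen) seen) s ↔
      x ∈ s ∨ ∃ r ∈ responses, ∃ p ∈ pvIndexB,
        PySem.Str.isIn p.1 (PySem.Str.lower r) = true ∧ x ∈ p.2 := by
  induction responses generalizing s with
  | nil => simp
  | cons r rs ih =>
    simp only [List.foldl_cons]
    rw [ih, pv_mem_inner]
    simp [or_assoc]

theorem pv_mem_seen (responses : List String) (x : String) :
    x ∈ pvSeenB responses ↔ ∃ r ∈ responses, ∃ p ∈ pvIndexB,
      PySem.Str.isIn p.1 (PySem.Str.lower r) = true ∧ x ∈ p.2 := by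
  rw [pvSeenB, pv_mem_seen_aux]
  simp [PySem.Set.empty]

theorem pv_cond (responses : List String) (t : String) (kws : List String)
    (hk : ∀ p ∈ pvIndexB, t ∈ p.2 → p.1 ∈ kws)
    (hk2 : ∀ kw ∈ kws, ∃ p ∈ pvIndexB, p.1 = kw ∧ t ∈ p.2) :
    PySem.Set.contains (pvSeenB responses) t =
      responses.any (fun r => kws.any (fun kw => PySem.Str.isIn kw (PySem.Str.lower r))) := by
  rw [Bool.eq_iff_iff, PySem.Set.contains_iff, pv_mem_seen]
  simp only [List.any_eq_true]
  constructor
  · rintro ⟨r, hr, p, hp, hin, ht⟩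
    exact ⟨r, hr, p.1, hk p hp ht, hin⟩
  · rintro ⟨r, hr, kw, hkw, hin⟩
    obtain ⟨p, hp, hpk, ht⟩ := hk2 kw hkw
    exact ⟨r, hr, p, hp, by rw [hpk]; exact hin, ht⟩

-- ===== VERDICT (by name: the statement is the Claim_ definition above) =====
theorem extract_recurring_themes_py_spec : Claim_equal_extract_recurring_themes_py := by
  intro responses _
  unfold Spec_extract_recurring_themes_py
  unfold extract_recurring_themes_py extract_recurring_themes_py_alt
  rw [pvThemesA, pvThemeOrder]
  simp only [List.foldl_cons, List.foldl_nil, List.filter_cons, List.filter_nil]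
  rw [pv_cond responses "technology" ["tech", "software", "digital", "data"] (by decide) (by decide),
      pv_cond responses "leadership" ["lead", "manage", "direct", "guide"] (by decide) (by decide),
      pv_cond responses "innovation" ["innovate", "create", "develop", "design"] (by decide) (by decide),
      pv_cond responses "growth" ["learn", "grow", "improve", "develop"] (by decide) (by decide)]
  split_ifs <;> simp
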